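-- pv_equiv track=rewrite | github.com/Zuvix/romanNumbers | RomanConverter.py | check_more_than_three_consecutive_chars
-- ===== SOURCE A (Python) =====
-- roman_dict = {
--     "I": 1,
--     "V": 5,
--     "X": 10,
--     "L": 50,
--     "C": 100,
--     "D": 500,
--     "M": 1000
-- }
--
-- def check_more_than_three_consecutive_chars(romanNumber):
--     key_list = list(roman_dict.keys())
--
--     for x in range(len(key_list)):
--         sum = 0
--         maxSum = 1
--
--         if x % 2 == 0:
--             maxSum = 3
--
--         for element in romanNumber:
--             if element == key_list[x]:
--                 sum += 1
--
--                 if sum > maxSum: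
--                     return False
--             else:
--                 sum = 0
--     return True
-- ===== SOURCE B (Python) =====
-- def check_more_than_three_consecutive_chars(romanNumber):
--     allowed = {'I': 3, 'X': 3, 'C': 3, 'M': 3, 'V': 1, 'L': 1, 'D': 1}
--     prev = None
--     run = 0
--     for ch in romanNumber:
--         if ch == prev:
--             run += 1
--         else:
--             prev = ch
--             run = 1
--         if ch in allowed and run > allowed[ch]:
--             return False
--     return True
-- ===== Notes on version B (the rewrite author's own statement) =====
-- stated objective: faster
-- what changed: Replaces the outer loop over the 7 roman keys (each doing a full scan of the string) with a single pass that tracks the current character's consecutive run length against a fixed per-character allowance map.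
import Mathlib
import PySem

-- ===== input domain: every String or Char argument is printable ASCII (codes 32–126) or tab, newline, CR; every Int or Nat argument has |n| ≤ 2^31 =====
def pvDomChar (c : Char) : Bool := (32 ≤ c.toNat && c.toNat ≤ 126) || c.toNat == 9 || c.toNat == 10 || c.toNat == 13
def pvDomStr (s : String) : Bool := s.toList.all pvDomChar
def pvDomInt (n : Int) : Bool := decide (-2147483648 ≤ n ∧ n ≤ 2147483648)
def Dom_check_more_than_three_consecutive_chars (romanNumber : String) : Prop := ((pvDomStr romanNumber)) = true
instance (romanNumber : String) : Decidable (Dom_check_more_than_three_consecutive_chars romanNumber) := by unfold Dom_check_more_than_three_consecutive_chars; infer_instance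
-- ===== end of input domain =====

-- B replaces A's 7 full scans of the string (one per roman key) by a single pass
-- tracking the current consecutive run; same return value.

-- ===== PORT A =====
-- roman_dict (Python dict of 1-char string keys; keys ported as Char)
def pvRomanDict : PySem.Dict Char Int :=
  PySem.Dict.ofList [('I', 1), ('V', 5), ('X', 10), ('L', 50), ('C', 100), ('D', 500), ('M', 1000)]

-- inner 'for element in romanNumber' loop; returning false = Python 'return False'
def pvCheckKeyA (key : Char) (maxSum : Int) : List Char → Int → Bool
  | [], _ => true
  | element :: rest, sum =>
    if element == key then
      if sum + 1 > maxSum then false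
      else pvCheckKeyA key maxSum rest (sum + 1)
    else pvCheckKeyA key maxSum rest 0

-- outer 'for x in range(len(key_list))' loop; x paired with key_list[x] via enumerate
def pvOuterA (chars : List Char) : List (Int × Char) → Bool
  | [] => true
  | (x, k) :: rest =>
    let maxSum : Int := if x % 2 == 0 then 3 else 1
    if pvCheckKeyA k maxSum chars 0 then pvOuterA chars rest else false

def check_more_than_three_consecutive_chars (romanNumber : String) : Bool :=
  pvOuterA romanNumber.toList (PySem.List.enumerate (PySem.Dict.keys pvRomanDict))

-- ===== PORT B =====
def pvAllowed : PySem.Dict Char Int :=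
  PySem.Dict.ofList [('I', 3), ('X', 3), ('C', 3), ('M', 3), ('V', 1), ('L', 1), ('D', 1)]

def pvGoB : List Char → Option Char → Int → Bool
  | [], _, _ => true
  | ch :: rest, prev, run =>
    let run' : Int := if some ch == prev then run + 1 else 1
    match PySem.Dict.get? pvAllowed ch with
    | some m => if run' > m then false else pvGoB rest (some ch) run'
    | none => pvGoB rest (some ch) run'

def check_more_than_three_consecutive_chars_alt (romanNumber : String) : Bool :=
  pvGoB romanNumber.toList none 0

-- ===== PRECONDITION & SPEC =====
def Spec_check_more_than_three_consecutive_chars (romanNumber : String) (out : Bool) : Prop := out = check_more_than_three_consecutive_chars_alt romanNumber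
instance (romanNumber : String) (out : Bool) : Decidable (Spec_check_more_than_three_consecutive_chars romanNumber out) := by unfold Spec_check_more_than_three_consecutive_chars; infer_instance

-- ===== CLAIM (what is proved, stated in full; the proofs are below) =====
def Claim_equal_check_more_than_three_consecutive_chars : Prop := ∀ (romanNumber : String), Dom_check_more_than_three_consecutive_chars romanNumber → Spec_check_more_than_three_consecutive_chars romanNumber (check_more_than_three_consecutive_chars romanNumber)

-- ===== LEMMAS AND PROOFS =====

-- A's seven scans, as a nested-if chain with an arbitrary starting sum per key
def pvChain (chars : List Char) (sI sV sX sL sC sD sM : Int) : Bool :=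
  if pvCheckKeyA 'I' 3 chars sI then
    if pvCheckKeyA 'V' 1 chars sV then
      if pvCheckKeyA 'X' 3 chars sX then
        if pvCheckKeyA 'L' 1 chars sL then
          if pvCheckKeyA 'C' 3 chars sC then
            if pvCheckKeyA 'D' 1 chars sD then
              if pvCheckKeyA 'M' 3 chars sM then true else false
            else false
          else false
        else false
      else false
    else false
  else false

def pvS (prev : Option Char) (run : Int) (k : Char) : Int :=
  if prev = some k then run else 0

lemma pvOuterA_eq_chain (chars : List Char) :
    pvOuterA chars (PySem.List.enumerate (PySem.Dict.keys pvRomanDict)) =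
      pvChain chars 0 0 0 0 0 0 0 := by
  rfl

lemma pvAllowed_get?_none (ch : Char) (hI : ch ≠ 'I') (hV : ch ≠ 'V') (hX : ch ≠ 'X')
    (hL : ch ≠ 'L') (hC : ch ≠ 'C') (hD : ch ≠ 'D') (hM : ch ≠ 'M') :
    PySem.Dict.get? pvAllowed ch = none := by
  have h : pvAllowed = PySem.Dict.mk [('I', 3), ('X', 3), ('C', 3), ('M', 3), ('V', 1), ('L', 1), ('D', 1)] := by decide
  rw [h]
  simp only [PySem.Dict.get?_mk_cons, beq_iff_eq, if_neg (Ne.symm hI), if_neg (Ne.symm hV),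
    if_neg (Ne.symm hX), if_neg (Ne.symm hL), if_neg (Ne.symm hC), if_neg (Ne.symm hD),
    if_neg (Ne.symm hM)]
  rfl

lemma pvGoB_eq_chain (chars : List Char) :
    ∀ (prev : Option Char) (run : Int),
      pvGoB chars prev run =
        pvChain chars (pvS prev run 'I') (pvS prev run 'V') (pvS prev run 'X')
          (pvS prev run 'L') (pvS prev run 'C') (pvS prev run 'D') (pvS prev run 'M') := by
  induction chars with
  | nil => intro prev run; rfl
  | cons ch rest ih =>
    intro prev run
    by_cases hI : ch = 'I'
    · subst hI
      have hget : PySem.Dict.get? pvAllowed 'I' = some 3 := by decide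
      by_cases hp : prev = some 'I'
      · simp [pvGoB, hget, pvChain, pvCheckKeyA, pvS, hp]
        by_cases h3 : run + 1 > 3 <;> simp_all [pvChain, pvS]
      · have hps : ¬ some 'I' = prev := fun h => hp h.symm
        simp [pvGoB, hget, pvChain, pvCheckKeyA, pvS, hp, hps]
        by_cases h3 : (1:Int) > 3 <;> simp_all [pvChain, pvS]
    ·
      by_cases hV : ch = 'V'
      · subst hV
        have hget : PySem.Dict.get? pvAllowed 'V' = some 1 := by decide
        by_cases hp : prev = some 'V'
        · simp [pvGoB, hget, pvChain, pvCheckKeyA, pvS, hp]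
          by_cases h3 : run + 1 > 1 <;> simp_all [pvChain, pvS]
        · have hps : ¬ some 'V' = prev := fun h => hp h.symm
          simp [pvGoB, hget, pvChain, pvCheckKeyA, pvS, hp, hps]
          by_cases h3 : (1:Int) > 1 <;> simp_all [pvChain, pvS]
      ·
        by_cases hX : ch = 'X'
        · subst hX
          have hget : PySem.Dict.get? pvAllowed 'X' = some 3 := by decide
          by_cases hp : prev = some 'X'
          · simp [pvGoB, hget, pvChain, pvCheckKeyA, pvS, hp]
            by_cases h3 : run + 1 > 3 <;> simp_all [pvChain, pvS]
          · have hps : ¬ some 'X' = prev := fun h => hp h.symm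
            simp [pvGoB, hget, pvChain, pvCheckKeyA, pvS, hp, hps]
            by_cases h3 : (1:Int) > 3 <;> simp_all [pvChain, pvS]
        ·
          by_cases hL : ch = 'L'
          · subst hL
            have hget : PySem.Dict.get? pvAllowed 'L' = some 1 := by decide
            by_cases hp : prev = some 'L'
            · simp [pvGoB, hget, pvChain, pvCheckKeyA, pvS, hp]
              by_cases h3 : run + 1 > 1 <;> simp_all [pvChain, pvS]
            · have hps : ¬ some 'L' = prev := fun h => hp h.symm
              simp [pvGoB, hget, pvChain, pvCheckKeyA, pvS, hp, hps]
              by_cases h3 : (1:Int) > 1 <;> simp_all [pvChain, pvS]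
          ·
            by_cases hC : ch = 'C'
            · subst hC
              have hget : PySem.Dict.get? pvAllowed 'C' = some 3 := by decide
              by_cases hp : prev = some 'C'
              · simp [pvGoB, hget, pvChain, pvCheckKeyA, pvS, hp]
                by_cases h3 : run + 1 > 3 <;> simp_all [pvChain, pvS]
              · have hps : ¬ some 'C' = prev := fun h => hp h.symm
                simp [pvGoB, hget, pvChain, pvCheckKeyA, pvS, hp, hps]
                by_cases h3 : (1:Int) > 3 <;> simp_all [pvChain, pvS]
            ·
              by_cases hD : ch = 'D'
              · subst hD
                have hget : PySem.Dict.get? pvAllowed 'D' = some 1 := by decide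
                by_cases hp : prev = some 'D'
                · simp [pvGoB, hget, pvChain, pvCheckKeyA, pvS, hp]
                  by_cases h3 : run + 1 > 1 <;> simp_all [pvChain, pvS]
                · have hps : ¬ some 'D' = prev := fun h => hp h.symm
                  simp [pvGoB, hget, pvChain, pvCheckKeyA, pvS, hp, hps]
                  by_cases h3 : (1:Int) > 1 <;> simp_all [pvChain, pvS]
              ·
                by_cases hM : ch = 'M'
                · subst hM
                  have hget : PySem.Dict.get? pvAllowed 'M' = some 3 := by decide
                  by_cases hp : prev = some 'M'
                  · simp [pvGoB, hget, pvChain, pvCheckKeyA, pvS, hp]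
                    by_cases h3 : run + 1 > 3 <;> simp_all [pvChain, pvS]
                  · have hps : ¬ some 'M' = prev := fun h => hp h.symm
                    simp [pvGoB, hget, pvChain, pvCheckKeyA, pvS, hp, hps]
                    by_cases h3 : (1:Int) > 3 <;> simp_all [pvChain, pvS]
                ·
                  have hget := pvAllowed_get?_none ch hI hV hX hL hC hD hM
                  simp [pvGoB, hget, pvChain, pvCheckKeyA, pvS, ih, hI, hV, hX, hL, hC, hD, hM]

-- ===== VERDICT (by name: the statement is the Claim_ definition above) =====
theorem check_more_than_three_consecutive_chars_spec : Claim_equal_check_more_than_three_consecutive_chars := by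
  intro s _
  unfold Spec_check_more_than_three_consecutive_chars
  unfold check_more_than_three_consecutive_chars check_more_than_three_consecutive_chars_alt
  rw [pvOuterA_eq_chain, pvGoB_eq_chain]
  rfl
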